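-- pv_equiv track=rewrite | github.com/Cas-Maravilha/FarmTech-Solutions-main-main | analise_otimizacao_memoria.py | calcular_tamanho_estrutura
-- ===== SOURCE A (Python) =====
-- def calcular_tamanho_estrutura(conteudo):
--     """Calcula tamanho estimado de uma estrutura"""
--     tamanho = 0
--     linhas = conteudo.split('\n')
--
--     for linha in linhas:
--         linha = linha.strip()
--         if ';' in linha and not linha.startswith('//'):
--             if 'float' in linha:
--                 tamanho += 4
--             elif 'int' in linha and 'uint8_t' not in linha and 'uint16_t' not in linha:
--                 tamanho += 4
--             elif 'uint8_t' in linha: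
--                 tamanho += 1
--             elif 'uint16_t' in linha:
--                 tamanho += 2
--             elif 'uint32_t' in linha:
--                 tamanho += 4
--             elif 'bool' in linha:
--                 tamanho += 1
--             elif 'String' in linha:
--                 tamanho += 4  # Ponteiro
--
--     return tamanho
-- ===== SOURCE B (Python) =====
-- _SIZES = [('float', 4), ('uint8_t', 1), ('uint16_t', 2), ('uint32_t', 4),
--           ('int', 4), ('bool', 1), ('String', 4)]
--
-- def calcular_tamanho_estrutura(conteudo):
--     """Calcula tamanho estimado de uma estrutura"""
--     # Stage 1: collect the qualifying (declaration-like) lines once.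
--     restantes = [l for l in (x.strip() for x in conteudo.split('\n'))
--                  if ';' in l and not l.startswith('//')]
--     # Stage 2: keyword-major sieve: for each keyword in priority order,
--     # charge its size for every remaining line containing it and drop
--     # those lines, so each line is billed to its highest-priority keyword.
--     tamanho = 0
--     for palavra, bytes_ in _SIZES:
--         com, sem = [], []
--         for l in restantes:
--             (com if palavra in l else sem).append(l)
--         tamanho += bytes_ * len(com)
--         restantes = sem
--     return tamanho
-- ===== Notes on version B (the rewrite author's own statement) =====
-- stated objective: alternative
-- what changed: Replaces A's line-major elif chain by a keyword-major sieve: qualifying lines are collected once, then for each keyword in priority order the remaining lines containing it are counted (size times count) and removed, so each line is billed to its highest-priority keyword.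
import Mathlib
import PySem

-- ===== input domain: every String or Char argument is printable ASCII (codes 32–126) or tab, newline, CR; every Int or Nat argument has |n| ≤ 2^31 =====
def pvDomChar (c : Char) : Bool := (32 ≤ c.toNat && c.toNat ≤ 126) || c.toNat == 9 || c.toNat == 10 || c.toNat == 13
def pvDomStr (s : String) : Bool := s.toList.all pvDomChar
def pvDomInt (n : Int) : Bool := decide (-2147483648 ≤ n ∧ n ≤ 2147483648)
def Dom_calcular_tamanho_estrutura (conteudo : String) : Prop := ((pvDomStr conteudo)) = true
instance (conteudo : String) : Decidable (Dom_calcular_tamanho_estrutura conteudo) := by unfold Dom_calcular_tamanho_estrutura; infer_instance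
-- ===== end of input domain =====

-- B replaces A's line-major elif chain by a keyword-major sieve over the pre-filtered lines (alternative; same cost).

-- ===== PORT A =====
def calcular_tamanho_estrutura (conteudo : String) : Int :=
  (PySem.Chars.splitOn conteudo.toList "\n".toList).foldl (fun tamanho linha0 =>
    let linha := PySem.Chars.strip linha0
    if PySem.Chars.isIn ";".toList linha && !(PySem.Chars.startswith linha "//".toList) then
      if PySem.Chars.isIn "float".toList linha then tamanho + 4
      else if PySem.Chars.isIn "int".toList linha && !(PySem.Chars.isIn "uint8_t".toList linha)
               && !(PySem.Chars.isIn "uint16_t".toList linha) then tamanho + 4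
      else if PySem.Chars.isIn "uint8_t".toList linha then tamanho + 1
      else if PySem.Chars.isIn "uint16_t".toList linha then tamanho + 2
      else if PySem.Chars.isIn "uint32_t".toList linha then tamanho + 4
      else if PySem.Chars.isIn "bool".toList linha then tamanho + 1
      else if PySem.Chars.isIn "String".toList linha then tamanho + 4
      else tamanho
    else tamanho) 0

-- ===== PORT B =====
def pvSizes : List (String × Int) :=
  [("float", 4), ("uint8_t", 1), ("uint16_t", 2), ("uint32_t", 4),
   ("int", 4), ("bool", 1), ("String", 4)]

-- 'for l in restantes: (com if palavra in l else sem).append(l)' = one-pass partition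
-- 'tamanho += bytes_ * len(com); restantes = sem', folded over the keyword table
def pvSieve (restantes : List (List Char)) : List (String × Int) → Int
  | [] => 0
  | (palavra, bytes_) :: rest =>
      let p := restantes.partition (fun l => PySem.Chars.isIn palavra.toList l)
      bytes_ * (p.1.length : Int) + pvSieve p.2 rest

def calcular_tamanho_estrutura_alt (conteudo : String) : Int :=
  pvSieve
    (((PySem.Chars.splitOn conteudo.toList "\n".toList).map PySem.Chars.strip).filter
      (fun l => PySem.Chars.isIn ";".toList l && !(PySem.Chars.startswith l "//".toList)))
    pvSizes

-- ===== PRECONDITION & SPEC =====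
def Spec_calcular_tamanho_estrutura (conteudo : String) (out : Int) : Prop := out = calcular_tamanho_estrutura_alt conteudo
instance (conteudo : String) (out : Int) : Decidable (Spec_calcular_tamanho_estrutura conteudo out) := by unfold Spec_calcular_tamanho_estrutura; infer_instance

-- ===== CLAIM =====
def Claim_equal_calcular_tamanho_estrutura : Prop := ∀ (conteudo : String), Dom_calcular_tamanho_estrutura conteudo → Spec_calcular_tamanho_estrutura conteudo (calcular_tamanho_estrutura conteudo)

-- ===== LEMMAS AND PROOFS =====

-- first-match size of a line against a keyword table (A's elif chain, abstractly)
def pvFirstSize (linha : List Char) : List (String × Int) → Int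
  | [] => 0
  | (palavra, bytes_) :: rest =>
      if PySem.Chars.isIn palavra.toList linha then bytes_ else pvFirstSize linha rest

-- 'int' occurs in any line containing 'uint8_t'/'uint16_t'/'uint32_t'
theorem isIn_int_of_isIn_uint (u : List Char) (linha : List Char)
    (hu : (['i', 'n', 't'] : List Char) <:+: u)
    (h : PySem.Chars.isIn u linha = true) : PySem.Chars.isIn ['i', 'n', 't'] linha = true :=
  (PySem.Chars.isIn_iff_infix _ _).mpr (hu.trans ((PySem.Chars.isIn_iff_infix _ _).mp h))

theorem perLine_eq (linha : List Char) :
    (if PySem.Chars.isIn "float".toList linha then (4 : Int)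
     else if PySem.Chars.isIn "int".toList linha && !(PySem.Chars.isIn "uint8_t".toList linha)
              && !(PySem.Chars.isIn "uint16_t".toList linha) then 4
     else if PySem.Chars.isIn "uint8_t".toList linha then 1
     else if PySem.Chars.isIn "uint16_t".toList linha then 2
     else if PySem.Chars.isIn "uint32_t".toList linha then 4
     else if PySem.Chars.isIn "bool".toList linha then 1
     else if PySem.Chars.isIn "String".toList linha then 4
     else 0) = pvFirstSize linha pvSizes := by
  simp only [pvFirstSize, pvSizes]
  by_cases hf : PySem.Chars.isIn ['f', 'l', 'o', 'a', 't'] linha = true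
  · simp [hf]
  · by_cases h8 : PySem.Chars.isIn ['u', 'i', 'n', 't', '8', '_', 't'] linha = true
    · have hi := isIn_int_of_isIn_uint _ _ (by decide) h8
      simp [hf, h8, hi]
    · by_cases h16 : PySem.Chars.isIn ['u', 'i', 'n', 't', '1', '6', '_', 't'] linha = true
      · have hi := isIn_int_of_isIn_uint _ _ (by decide) h16
        simp [hf, h8, h16, hi]
      · by_cases h32 : PySem.Chars.isIn ['u', 'i', 'n', 't', '3', '2', '_', 't'] linha = true
        · have hi := isIn_int_of_isIn_uint _ _ (by decide) h32
          simp [hf, h8, h16, h32, hi]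
        · by_cases hi : PySem.Chars.isIn ['i', 'n', 't'] linha = true
          · simp [hf, h8, h16, h32, hi]
          · simp [hf, h8, h16, h32, hi]

-- splitting a map-sum over a Boolean test
theorem sum_map_ite_split (xs : List (List Char)) (p : List Char → Bool) (c : Int)
    (g : List Char → Int) :
    (xs.map (fun l => if p l then c else g l)).sum
      = c * ((xs.filter p).length : Int) + ((xs.filter (fun l => !p l)).map g).sum := by
  induction xs with
  | nil => simp
  | cons x xs ih =>
    by_cases hx : p x = true <;> simp [hx, ih] <;> ring

-- the keyword-major sieve computes the sum of line-major first-match sizes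
theorem sieve_eq_sum (T : List (String × Int)) (restantes : List (List Char)) :
    pvSieve restantes T = (restantes.map (fun l => pvFirstSize l T)).sum := by
  induction T generalizing restantes with
  | nil => simp [pvSieve, pvFirstSize]
  | cons kv T ih =>
    obtain ⟨palavra, bytes_⟩ := kv
    simp only [pvSieve, pvFirstSize, List.partition_eq_filter_filter]
    rw [ih, sum_map_ite_split restantes (fun l => PySem.Chars.isIn palavra.toList l)]
    rfl

-- sum over the filtered lines = sum over all lines with the test inlined
theorem sum_filter_eq_sum_ite (xs : List (List Char)) (q : List Char → Bool)
    (f : List Char → Int) :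
    ((xs.filter q).map f).sum = (xs.map (fun l => if q l then f l else 0)).sum := by
  induction xs with
  | nil => simp
  | cons x xs ih => by_cases hx : q x = true <;> simp [hx, ih]

-- A's accumulating fold = accumulator + sum over per-line contributions
theorem foldA_eq (lines : List (List Char)) (a : Int) :
    (lines.foldl (fun tamanho linha0 =>
      let linha := PySem.Chars.strip linha0
      if PySem.Chars.isIn ";".toList linha && !(PySem.Chars.startswith linha "//".toList) then
        if PySem.Chars.isIn "float".toList linha then tamanho + 4
        else if PySem.Chars.isIn "int".toList linha && !(PySem.Chars.isIn "uint8_t".toList linha)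
                 && !(PySem.Chars.isIn "uint16_t".toList linha) then tamanho + 4
        else if PySem.Chars.isIn "uint8_t".toList linha then tamanho + 1
        else if PySem.Chars.isIn "uint16_t".toList linha then tamanho + 2
        else if PySem.Chars.isIn "uint32_t".toList linha then tamanho + 4
        else if PySem.Chars.isIn "bool".toList linha then tamanho + 1
        else if PySem.Chars.isIn "String".toList linha then tamanho + 4
        else tamanho
      else tamanho) a)
    = a + (lines.map (fun linha0 =>
        let linha := PySem.Chars.strip linha0
        if PySem.Chars.isIn ";".toList linha && !(PySem.Chars.startswith linha "//".toList) then
          pvFirstSize linha pvSizes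
        else 0)).sum := by
  induction lines generalizing a with
  | nil => simp
  | cons x xs ih =>
    simp only [List.foldl_cons, List.map_cons, List.sum_cons, ih]
    have h := perLine_eq (PySem.Chars.strip x)
    split_ifs at h ⊢ <;> omega

-- ===== VERDICT =====
theorem calcular_tamanho_estrutura_spec : Claim_equal_calcular_tamanho_estrutura := by
  intro conteudo _
  unfold Spec_calcular_tamanho_estrutura calcular_tamanho_estrutura calcular_tamanho_estrutura_alt
  rw [foldA_eq, sieve_eq_sum, sum_filter_eq_sum_ite, List.map_map, zero_add]
  rfl
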